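-- pv_equiv track=rewrite | github.com/gclm/super-stack | scripts/browser/renderers/render_browser_report.py | normalize_multiline
-- ===== SOURCE A (Python) =====
-- def normalize_multiline(text: str, max_chars: int | None = None) -> str:
--     blocks = [block.strip() for block in str(text or "").split("\n\n")]
--     lines: list[str] = []
--     total = 0
--
--     for block in blocks:
--         if not block:
--             continue
--         normalized = "\n".join(line.strip() for line in block.splitlines() if line.strip()).strip()
--         if not normalized:
--             continue
--         next_total = total + len(normalized) + (2 if lines else 0)
--         if max_chars is not None and next_total > max_chars:
--             break
--         lines.append(normalized)
--         total = next_total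
--
--     return "\n\n".join(lines).strip()
-- ===== SOURCE B (Python) =====
-- def _clean(block):
--     stripped = [line.strip() for line in block.strip().splitlines()]
--     return "\n".join(line for line in stripped if line).strip()
--
--
-- def normalize_multiline(text: str, max_chars: int | None = None) -> str:
--     blocks = [b for b in map(_clean, (text or "").split("\n\n")) if b]
--     totals = []
--     running = 0
--     for b in blocks:
--         running += len(b) + (2 if totals else 0)
--         totals.append(running)
--     keep = len(blocks)
--     if max_chars is not None:
--         keep = 0
--         while keep < len(blocks) and totals[keep] <= max_chars:
--             keep += 1
--     return "\n\n".join(blocks[:keep]).strip()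
-- ===== Notes on version B (the rewrite author's own statement) =====
-- stated objective: alternative
-- what changed: B splits the work into two independent passes — first build the full list of cleaned paragraph blocks, then compute cumulative character totals and keep the longest affordable prefix — instead of A's single fused loop that normalizes, accounts and early-breaks per block.
import Mathlib
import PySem

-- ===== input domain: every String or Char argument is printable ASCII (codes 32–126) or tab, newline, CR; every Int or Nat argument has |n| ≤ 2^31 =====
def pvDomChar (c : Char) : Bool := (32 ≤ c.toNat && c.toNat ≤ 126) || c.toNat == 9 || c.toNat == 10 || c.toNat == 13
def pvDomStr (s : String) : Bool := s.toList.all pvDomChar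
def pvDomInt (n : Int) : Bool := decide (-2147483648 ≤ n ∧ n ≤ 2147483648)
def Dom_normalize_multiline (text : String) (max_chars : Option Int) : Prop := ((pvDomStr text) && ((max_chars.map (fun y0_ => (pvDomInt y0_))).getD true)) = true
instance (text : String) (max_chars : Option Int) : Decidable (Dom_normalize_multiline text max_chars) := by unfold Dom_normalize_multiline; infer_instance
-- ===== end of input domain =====

-- B separates normalization from truncation: it builds the cleaned blocks and their running totals first,
-- then takes the longest affordable prefix — same values as A's fused early-break loop (objective: alternative).

-- ===== PORT A =====
-- the inline expression  "\n".join(line.strip() for line in block.splitlines() if line.strip()).strip()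
def nmNormA (block : String) : String :=
  PySem.Str.strip (PySem.Str.join "\n"
    (((PySem.Str.splitlines block).filter (fun l => PySem.Str.strip l != "")).map PySem.Str.strip))

-- A's for-loop with `continue`/`break`, state (lines, total)
def nmLoopA (max_chars : Option Int) : List String → List String → Int → List String
  | [], lines, _ => lines
  | block :: rest, lines, total =>
    if block = "" then nmLoopA max_chars rest lines total
    else
      let normalized := nmNormA block
      if normalized = "" then nmLoopA max_chars rest lines total
      else
        let next_total := total + PySem.Str.len normalized + (if lines = [] then 0 else 2)
        match max_chars with
        | some m =>
          if next_total > m then lines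
          else nmLoopA max_chars rest (lines ++ [normalized]) next_total
        | none => nmLoopA max_chars rest (lines ++ [normalized]) next_total

def normalize_multiline (text : String) (max_chars : Option Int) : String :=
  let t := if text = "" then "" else text          -- str(text or "")
  let blocks := ((PySem.Str.split? t "\n\n").getD []).map PySem.Str.strip   -- sep ≠ "", split? never none
  PySem.Str.strip (PySem.Str.join "\n\n" (nmLoopA max_chars blocks [] 0))

-- ===== PORT B =====
def nmClean (block : String) : String :=
  let stripped := (PySem.Str.splitlines (PySem.Str.strip block)).map PySem.Str.strip
  PySem.Str.strip (PySem.Str.join "\n" (stripped.filter (fun l => l != "")))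

-- totals: running cumulative budget per cleaned block (+2 for every separator after the first)
def nmTotals (blocks : List String) : List Int :=
  (blocks.foldl (fun (acc : List Int × Int) b =>
    let r := acc.2 + PySem.Str.len b + (if acc.1 = [] then 0 else 2)
    (acc.1 ++ [r], r)) ([], 0)).1

-- the while loop: count leading totals ≤ m
def nmKeep : List Int → Int → Nat
  | [], _ => 0
  | t :: rest, m => if t ≤ m then nmKeep rest m + 1 else 0

def normalize_multiline_alt (text : String) (max_chars : Option Int) : String :=
  let t := if text = "" then "" else text
  let blocks := (((PySem.Str.split? t "\n\n").getD []).map nmClean).filter (fun b => b != "")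
  let keep := match max_chars with
    | none => blocks.length
    | some m => nmKeep (nmTotals blocks) m
  PySem.Str.strip (PySem.Str.join "\n\n" (blocks.take keep))

-- ===== PRECONDITION & SPEC =====
def Spec_normalize_multiline (text : String) (max_chars : Option Int) (out : String) : Prop := out = normalize_multiline_alt text max_chars
instance (text : String) (max_chars : Option Int) (out : String) : Decidable (Spec_normalize_multiline text max_chars out) := by unfold Spec_normalize_multiline; infer_instance

-- ===== CLAIM (what is proved, stated in full; the proofs are below) =====
def Claim_equal_normalize_multiline : Prop := ∀ (text : String) (max_chars : Option Int), Dom_normalize_multiline text max_chars → Spec_normalize_multiline text max_chars (normalize_multiline text max_chars)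

-- ===== LEMMAS AND PROOFS =====

-- proof-side: A's loop after the two `continue` branches are compiled away
def pvLoopB (max_chars : Option Int) : List String → List String → Int → List String
  | [], lines, _ => lines
  | n :: rest, lines, total =>
    let nt := total + PySem.Str.len n + (if lines = [] then 0 else 2)
    match max_chars with
    | some m => if nt > m then lines else pvLoopB max_chars rest (lines ++ [n]) nt
    | none => pvLoopB max_chars rest (lines ++ [n]) nt

-- proof-side: break-count of the loop once lines is nonempty (always +2)
def pvKcnt : List String → Int → Int → Nat
  | [], _, _ => 0
  | b :: rest, total, m =>
    if total + PySem.Str.len b + 2 > m then 0 else pvKcnt rest (total + PySem.Str.len b + 2) m + 1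

-- proof-side: the tail of nmTotals as a clean recursion
def pvTotalsR : List String → Int → List Int
  | [], _ => []
  | b :: bs, t => (t + PySem.Str.len b + 2) :: pvTotalsR bs (t + PySem.Str.len b + 2)

theorem pv_filter_map_swap (ls : List String) :
    ((ls.filter (fun l => PySem.Str.strip l != "")).map PySem.Str.strip)
      = ((ls.map PySem.Str.strip).filter (fun l => l != "")) := by
  induction ls with
  | nil => rfl
  | cons l ls ih => by_cases h : PySem.Str.strip l = "" <;> simp only [List.filter_cons, List.map_cons, h, bne_self_eq_false, Bool.false_eq_true, if_false, if_true, bne_iff_ne, ne_eq, not_false_eq_true, ih]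

theorem pv_cleanEq (r : String) : nmClean r = nmNormA (PySem.Str.strip r) := by
  unfold nmClean nmNormA
  rw [pv_filter_map_swap]

theorem pv_clean_empty (r : String) (h : PySem.Str.strip r = "") : nmClean r = "" := by
  unfold nmClean
  rw [h]
  rfl

theorem pv_loopA_eq_loopB (mc : Option Int) (rs : List String) :
    ∀ lines total, nmLoopA mc (rs.map PySem.Str.strip) lines total
      = pvLoopB mc ((rs.map nmClean).filter (fun b => b != "")) lines total := by
  induction rs with
  | nil => intro _ _; rfl
  | cons r rs ih =>
    intro lines total
    by_cases hb : PySem.Str.strip r = ""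
    · have hcl : nmClean r = "" := pv_clean_empty r hb
      have hcne : (nmClean r != "") = false := by simp [hcl]
      simp only [List.map_cons, List.filter_cons, hcne, Bool.false_eq_true, if_false]
      simp only [nmLoopA]
      rw [if_pos hb]
      exact ih _ _
    · have hc : nmNormA (PySem.Str.strip r) = nmClean r := (pv_cleanEq r).symm
      by_cases hn : nmClean r = ""
      · have hcne : (nmClean r != "") = false := by simp [hn]
        simp only [List.map_cons, List.filter_cons, hcne, Bool.false_eq_true, if_false]
        simp only [nmLoopA]
        rw [if_neg hb, hc, if_pos hn]
        exact ih _ _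
      · have hcne : (nmClean r != "") = true := by simp [hn]
        simp only [List.map_cons, List.filter_cons, hcne, if_true]
        simp only [nmLoopA, pvLoopB]
        rw [if_neg hb, hc, if_neg hn]
        simp only [ih]

theorem pv_loopB_none (bs : List String) :
    ∀ lines total, pvLoopB none bs lines total = lines ++ bs := by
  induction bs with
  | nil => intro _ _; simp [pvLoopB]
  | cons b bs ih =>
    intro lines total
    simp only [pvLoopB]
    rw [ih]
    simp only [List.append_assoc, List.singleton_append]

theorem pv_loopB_some (m : Int) (bs : List String) :
    ∀ lines total, lines ≠ [] →
      pvLoopB (some m) bs lines total = lines ++ bs.take (pvKcnt bs total m) := by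
  induction bs with
  | nil => intro _ _ _; simp [pvLoopB, pvKcnt]
  | cons b bs ih =>
    intro lines total hl
    simp only [pvLoopB, pvKcnt]
    rw [if_neg hl]
    by_cases hgt : m < total + PySem.Str.len b + 2
    · rw [if_pos hgt, if_pos hgt, List.take_zero, List.append_nil]
    · rw [if_neg hgt, if_neg hgt, ih (lines ++ [b]) (total + PySem.Str.len b + 2) (by simp),
        List.take_succ_cons, List.append_assoc, List.singleton_append]

theorem pv_totals_foldl (bs : List String) :
    ∀ (acc : List Int) (t : Int), acc ≠ [] →
      (bs.foldl (fun (acc : List Int × Int) b =>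
        (acc.1 ++ [acc.2 + PySem.Str.len b + if acc.1 = [] then 0 else 2],
         acc.2 + PySem.Str.len b + if acc.1 = [] then 0 else 2)) (acc, t)).1
        = acc ++ pvTotalsR bs t := by
  induction bs with
  | nil => intro _ _ _; simp [pvTotalsR]
  | cons b bs ih =>
    intro acc t hacc
    simp only [List.foldl_cons, if_neg hacc]
    rw [ih (acc ++ [t + PySem.Str.len b + 2]) (t + PySem.Str.len b + 2) (by simp)]
    simp only [pvTotalsR, List.append_assoc, List.singleton_append]

theorem pv_totals_cons (b : String) (bs : List String) :
    nmTotals (b :: bs) = PySem.Str.len b :: pvTotalsR bs (PySem.Str.len b) := by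
  unfold nmTotals
  simp only [List.foldl_cons, List.nil_append, if_true, zero_add, add_zero]
  rw [pv_totals_foldl bs [PySem.Str.len b] (PySem.Str.len b) (by simp)]
  simp only [List.singleton_append]

theorem pv_keep_totalsR (bs : List String) :
    ∀ t m, nmKeep (pvTotalsR bs t) m = pvKcnt bs t m := by
  induction bs with
  | nil => intro _ _; rfl
  | cons b bs ih =>
    intro t m
    simp only [pvTotalsR, nmKeep, pvKcnt]
    by_cases h : t + PySem.Str.len b + 2 ≤ m
    · rw [if_pos h, if_neg (not_lt.mpr h), ih]
    · rw [if_neg h, if_pos (not_le.mp h)]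

theorem pv_loopB_some_top (m : Int) (bs : List String) :
    pvLoopB (some m) bs [] 0 = bs.take (nmKeep (nmTotals bs) m) := by
  cases bs with
  | nil => rfl
  | cons b tl =>
    rw [pv_totals_cons]
    have step : pvLoopB (some m) (b :: tl) [] 0
        = if PySem.Str.len b > m then [] else pvLoopB (some m) tl [b] (PySem.Str.len b) := by
      simp only [pvLoopB]
      norm_num
    rw [step]
    simp only [nmKeep]
    rw [pv_keep_totalsR]
    by_cases hm : PySem.Str.len b ≤ m
    · rw [if_neg (not_lt.mpr hm), if_pos hm,
        pv_loopB_some m tl [b] (PySem.Str.len b) (by simp),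
        List.take_succ_cons, List.singleton_append]
    · rw [if_pos (not_le.mp hm), if_neg hm, List.take_zero]

-- ===== VERDICT (by name: the statement is the Claim_ definition above) =====
theorem normalize_multiline_spec : Claim_equal_normalize_multiline := by
  intro text mc hdom
  clear hdom
  unfold Spec_normalize_multiline
  simp only [normalize_multiline, normalize_multiline_alt]
  rw [pv_loopA_eq_loopB]
  generalize (List.filter (fun b => b != "")
      (List.map nmClean ((PySem.Str.split? (if text = "" then "" else text) "\n\n").getD []))) = bs
  cases mc with
  | none =>
    rw [pv_loopB_none, List.nil_append]
    show _ = PySem.Str.strip (PySem.Str.join "\n\n" (List.take bs.length bs))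
    rw [List.take_length]
  | some m =>
    rw [pv_loopB_some_top]
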